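-- pv_equiv track=rewrite | github.com/NEELSAMEL23/DSA | 2.Traverse/Python/58.XsmallestFrequency.py | smallestFrequency
-- ===== SOURCE A (Python) =====
-- def smallestFrequency(matrix,N):
--   diagElemen = []
--
--   for i in range(N):
--     diagElemen.append(matrix[i][i])
--     diagElemen.append(matrix[i][N-1-i])
--
--   min_val = min(diagElemen)
--   res = diagElemen.count(min_val)
--   return res
-- ===== SOURCE B (Python) =====
-- def smallestFrequency(matrix, N):
--     # single streaming pass: maintain (best, cnt) over both diagonal values
--     best = None
--     cnt = 0
--     for i in range(N):
--         for v in (matrix[i][i], matrix[i][N - 1 - i]):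
--             if best is None or v < best:
--                 best = v
--                 cnt = 1
--             elif v == best:
--                 cnt += 1
--     if best is None:
--         raise ValueError("min() arg is an empty sequence")  # no elements seen (N <= 0)
--     return cnt
-- ===== Notes on version B (the rewrite author's own statement) =====
-- stated objective: alternative
-- what changed: Replaces A's build-a-list / min() / count() three-pass structure with a single streaming fold that maintains a running (best, cnt) pair and never materialises the diagonal list.
import Mathlib
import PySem

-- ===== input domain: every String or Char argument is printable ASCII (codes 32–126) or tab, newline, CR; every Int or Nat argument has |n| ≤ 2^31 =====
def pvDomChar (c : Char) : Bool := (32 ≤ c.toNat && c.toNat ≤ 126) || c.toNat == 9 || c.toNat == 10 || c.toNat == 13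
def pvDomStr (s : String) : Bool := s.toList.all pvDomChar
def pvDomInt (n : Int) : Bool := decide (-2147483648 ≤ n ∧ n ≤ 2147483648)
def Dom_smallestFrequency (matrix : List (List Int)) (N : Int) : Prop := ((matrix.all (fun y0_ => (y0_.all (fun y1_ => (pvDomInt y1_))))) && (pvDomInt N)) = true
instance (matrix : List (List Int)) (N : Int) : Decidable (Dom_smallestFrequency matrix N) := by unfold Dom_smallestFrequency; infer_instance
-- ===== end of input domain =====

-- B replaces A's build-list / min() / count() three passes by one streaming (best, cnt) fold; equal return values on Pre_ (alternative, not claimed faster).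


-- ===== PORT A =====
-- matrix[i][i] / matrix[i][N-1-i]; Pre_ guarantees the indices are in range, so the
-- default 0 of pyGetD is never used on admitted inputs.
def pvGetA (matrix : List (List Int)) (i j : Int) : Int :=
  PySem.List.pyGetD (PySem.List.pyGetD matrix i []) j 0

def smallestFrequency (matrix : List (List Int)) (N : Int) : Int :=
  let diagElemen : List Int :=
    (PySem.List.pyRange 0 N 1).foldl
      (fun acc i => (acc ++ [pvGetA matrix i i]) ++ [pvGetA matrix i (N - 1 - i)]) []
  match PySem.List.min? diagElemen (fun x => x) with
  | some min_val => (diagElemen.count min_val : Int)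
  | none => 0   -- min([]) raises ValueError in Python; excluded by Pre_

-- ===== PORT B =====
def pvStep (st : Option Int × Int) (v : Int) : Option Int × Int :=
  match st with
  | (none, _) => (some v, 1)
  | (some b, c) => if v < b then (some v, 1) else if v == b then (some b, c + 1) else (some b, c)

def smallestFrequency_alt (matrix : List (List Int)) (N : Int) : Int :=
  let st :=
    (PySem.List.pyRange 0 N 1).foldl
      (fun st i => [pvGetA matrix i i, pvGetA matrix i (N - 1 - i)].foldl pvStep st)
      (none, 0)
  st.2

-- ===== PRECONDITION & SPEC =====
-- Pre_ excludes exactly the inputs on which Python A raises: N ≤ 0 (ValueError from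
-- min([])) and out-of-range diagonal accesses (IndexError).
def Pre_smallestFrequency (matrix : List (List Int)) (N : Int) : Prop :=
  0 < N ∧ N ≤ (matrix.length : Int) ∧
    ∀ i ∈ List.range N.toNat,
      i < (matrix.getD i []).length ∧ N.toNat - 1 - i < (matrix.getD i []).length
instance (matrix : List (List Int)) (N : Int) : Decidable (Pre_smallestFrequency matrix N) := by
  unfold Pre_smallestFrequency; infer_instance
def pvWitness_smallestFrequency : List (List Int) × Int := ([[1, 2], [3, 4]], 2)

def Spec_smallestFrequency (matrix : List (List Int)) (N : Int) (out : Int) : Prop := out = smallestFrequency_alt matrix N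
instance (matrix : List (List Int)) (N : Int) (out : Int) : Decidable (Spec_smallestFrequency matrix N out) := by unfold Spec_smallestFrequency; infer_instance

-- ===== CLAIM (what is proved, stated in full; the proofs are below) =====
def Claim_equal_smallestFrequency : Prop := ∀ (matrix : List (List Int)) (N : Int), Dom_smallestFrequency matrix N → Pre_smallestFrequency matrix N → Spec_smallestFrequency matrix N (smallestFrequency matrix N)

-- ===== LEMMAS AND PROOFS =====

theorem pv_foldl_min_le (xs : List Int) (b : Int) : xs.foldl min b ≤ b := by
  induction xs generalizing b with
  | nil => simp
  | cons v rest ih => exact le_trans (ih (min b v)) (min_le_left _ _)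

theorem pv_step_run (xs : List Int) (b : Int) (c : Int) :
    xs.foldl pvStep (some b, c) =
      (some (xs.foldl min b),
        (if xs.foldl min b = b then c else 0) + (xs.count (xs.foldl min b) : Int)) := by
  induction xs generalizing b c with
  | nil => simp
  | cons v rest ih =>
    simp only [List.foldl_cons, pvStep]
    by_cases hlt : v < b
    · have hmin : min b v = v := min_eq_right hlt.le
      have hM : rest.foldl min v ≤ v := pv_foldl_min_le rest v
      have hMb : rest.foldl min v ≠ b := by omega
      simp only [if_pos hlt, ih, hmin, hMb, if_false]
      rw [List.count_cons]
      by_cases hv : rest.foldl min v = v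
      · simp [hv]; ring
      · have : ¬ (v = rest.foldl min v) := fun h => hv h.symm
        simp [this, hv]
    · by_cases heq : v = b
      · subst heq
        have hmin : min v v = v := min_self v
        simp only [if_neg hlt, beq_self_eq_true, if_pos, ih, hmin]
        rw [List.count_cons]
        by_cases hM : rest.foldl min v = v
        · simp [hM]; ring
        · have : ¬ (v = rest.foldl min v) := fun h => hM h.symm
          simp [hM, this]
      · have hbv : b < v := by omega
        have hM : rest.foldl min b ≤ b := pv_foldl_min_le rest b
        have hMv : ¬ (v = rest.foldl min b) := by omega
        have hbeq : (v == b) = false := by simp [heq]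
        have hmin : min b v = b := min_eq_left hbv.le
        simp only [if_neg hlt, hbeq, Bool.false_eq_true, if_false, ih, hmin, List.count_cons]
        simp [hMv]

theorem pv_step_list (xs : List Int) (x : Int) :
    ((x :: xs).foldl pvStep (none, 0)).2 = (((x :: xs).count (xs.foldl min x) : Nat) : Int) := by
  have h0 : pvStep (none, 0) x = (some x, 1) := rfl
  rw [List.foldl_cons, h0, pv_step_run]
  have hM : xs.foldl min x ≤ x := pv_foldl_min_le xs x
  rw [List.count_cons]
  by_cases hx : xs.foldl min x = x
  · simp [hx]; omega
  · have : ¬ (x = xs.foldl min x) := fun h => hx h.symm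
    simp [hx, this]

theorem pv_foldl_two (matrix : List (List Int)) (N : Int) (st : Option Int × Int) (r : List Int) :
    r.foldl (fun st i => pvStep (pvStep st (pvGetA matrix i i)) (pvGetA matrix i (N - 1 - i))) st
      = (r.flatMap (fun i => [pvGetA matrix i i, pvGetA matrix i (N - 1 - i)])).foldl pvStep st := by
  induction r generalizing st with
  | nil => rfl
  | cons i r ih =>
    simp only [List.foldl_cons, List.flatMap_cons, List.foldl_append, List.foldl_nil]
    exact ih _

theorem smallestFrequency_eq (matrix : List (List Int)) (N : Int) (hN : 0 < N) :
    smallestFrequency matrix N = smallestFrequency_alt matrix N := by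
  unfold smallestFrequency smallestFrequency_alt
  simp only [List.append_assoc, List.singleton_append, List.foldl_cons, List.foldl_nil]
  simp only [PySem.List.foldl_append_eq_flatMap
    (g := fun i => [pvGetA matrix i i, pvGetA matrix i (N - 1 - i)]), List.nil_append]
  rw [pv_foldl_two, PySem.List.pyRange_one_cons (show (0:Int) < N from hN)]
  rw [List.flatMap_cons, List.cons_append, List.cons_append, List.nil_append]
  rw [PySem.List.min?_id_cons, List.foldl_cons, pv_step_list]
  simp only [List.foldl_cons]

-- ===== VERDICT (by name: the statement is the Claim_ definition above) =====
theorem smallestFrequency_spec : Claim_equal_smallestFrequency := by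
  intro matrix N _ hPre
  unfold Spec_smallestFrequency
  exact (smallestFrequency_eq matrix N hPre.1)
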